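-- pv_equiv track=rewrite | github.com/asishm/aoc-2018 | day2.py | prob1
-- ===== SOURCE A (Python) =====
-- from collections import Counter
--
-- def prob1(s):
--     twos = 0
--     threes = 0
--     for c in s:
--         counter = set(Counter(c).values())
--         if 2 in counter:
--             twos += 1
--         if 3 in counter:
--             threes += 1
--     return twos * threes
-- ===== SOURCE B (Python) =====
-- def prob1(s):
--     twos = 0
--     threes = 0
--     for c in s:
--         has2 = False
--         has3 = False
--         prev = None
--         run = 0
--         for ch in sorted(c):
--             if prev == ch:
--                 run += 1
--             else:
--                 if run == 2:
--                     has2 = True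
--                 if run == 3:
--                     has3 = True
--                 prev = ch
--                 run = 1
--         if run == 2:
--             has2 = True
--         if run == 3:
--             has3 = True
--         if has2:
--             twos += 1
--         if has3:
--             threes += 1
--     return twos * threes
-- ===== Notes on version B (the rewrite author's own statement) =====
-- stated objective: faster
-- what changed: Replaces Counter's per-string hash-based frequency dict and set-of-values membership test by sorting each string and scanning its consecutive equal runs, flagging a run of length exactly 2 or exactly 3.
import Mathlib
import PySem

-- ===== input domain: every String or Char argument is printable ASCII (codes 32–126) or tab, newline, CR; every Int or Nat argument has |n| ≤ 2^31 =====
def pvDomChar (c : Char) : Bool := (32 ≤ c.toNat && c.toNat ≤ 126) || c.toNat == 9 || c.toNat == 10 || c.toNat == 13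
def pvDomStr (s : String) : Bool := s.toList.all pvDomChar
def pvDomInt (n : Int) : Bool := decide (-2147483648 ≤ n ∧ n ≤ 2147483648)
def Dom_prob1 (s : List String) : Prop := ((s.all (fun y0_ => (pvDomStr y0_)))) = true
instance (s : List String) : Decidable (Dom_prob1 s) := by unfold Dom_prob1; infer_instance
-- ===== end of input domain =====

-- B replaces A's Counter-based hash counting by sorting each string and scanning its
-- consecutive runs for one of length exactly 2 / exactly 3 (different algorithm; a timing run measured B faster by a constant factor).


-- ===== PORT A =====
-- counter = set(Counter(c).values()); if 2 in counter: twos += 1; if 3 in counter: threes += 1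
def prob1 (s : List String) : Int :=
  let st := s.foldl (fun (acc : Int × Int) c =>
    let counter : PySem.Set Int := PySem.Set.ofList ((PySem.Dict.counter c.toList).values)
    let twos := if PySem.Set.contains counter 2 then acc.1 + 1 else acc.1
    let threes := if PySem.Set.contains counter 3 then acc.2 + 1 else acc.2
    (twos, threes)) (0, 0)
  st.1 * st.2

-- ===== PORT B =====
-- one step of B's inner loop over sorted(c): state = (has2, has3, prev, run)
def pvStep (st : Bool × Bool × Option Char × Int) (ch : Char) : Bool × Bool × Option Char × Int :=
  if st.2.2.1 = some ch then (st.1, st.2.1, st.2.2.1, st.2.2.2 + 1)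
  else (st.1 || (st.2.2.2 == 2), st.2.1 || (st.2.2.2 == 3), some ch, 1)

-- the flush of the last run after the inner loop
def pvFlush (st : Bool × Bool × Option Char × Int) : Bool × Bool :=
  (st.1 || (st.2.2.2 == 2), st.2.1 || (st.2.2.2 == 3))

def prob1_alt (s : List String) : Int :=
  let st := s.foldl (fun (acc : Int × Int) c =>
    let p := pvFlush ((PySem.List.sorted c.toList (fun x => x) false).foldl pvStep (false, false, none, 0))
    ((if p.1 then acc.1 + 1 else acc.1), (if p.2 then acc.2 + 1 else acc.2))) (0, 0)
  st.1 * st.2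

-- ===== PRECONDITION & SPEC =====
def Spec_prob1 (s : List String) (out : Int) : Prop := out = prob1_alt s
instance (s : List String) (out : Int) : Decidable (Spec_prob1 s out) := by unfold Spec_prob1; infer_instance

-- ===== CLAIM (what is proved, stated in full; the proofs are below) =====
def Claim_equal_prob1 : Prop := ∀ (s : List String), Dom_prob1 s → Spec_prob1 s (prob1 s)

-- ===== LEMMAS AND PROOFS =====

theorem pvIntBeq (r s : Int) : (r == s) = decide (r = s) := by
  rw [Bool.eq_iff_iff]; simp

theorem pvPairCongr (h2 h3 : Bool) {p p' q q' : Prop}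
    [Decidable p] [Decidable p'] [Decidable q] [Decidable q'] (hp : p ↔ p') (hq : q ↔ q') :
    ((h2 || decide p, h3 || decide q) : Bool × Bool) = (h2 || decide p', h3 || decide q') := by
  rw [decide_eq_decide.mpr hp, decide_eq_decide.mpr hq]

theorem pvIffSame (b : Char) (t : List Char) (r n : Int) :
    (r + 1 + (t.count b : Int) = n ∨ ∃ ch ∈ t, ch ≠ b ∧ (t.count ch : Int) = n) ↔
      (r + ((b :: t).count b : Int) = n ∨ ∃ ch ∈ b :: t, ch ≠ b ∧ ((b :: t).count ch : Int) = n) := by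
  rw [List.count_cons_self]
  constructor
  · rintro (h | ⟨ch, hch, hne, hc⟩)
    · left; push_cast at h ⊢; omega
    · exact Or.inr ⟨ch, List.mem_cons_of_mem _ hch, hne, by simp [Ne.symm hne]; exact_mod_cast hc⟩
  · rintro (h | ⟨ch, hch, hne, hc⟩)
    · left; push_cast at h ⊢; omega
    · rcases List.mem_cons.mp hch with rfl | hch'
      · exact absurd rfl hne
      · refine Or.inr ⟨ch, hch', hne, ?_⟩
        simp [Ne.symm hne] at hc; exact_mod_cast hc

theorem pvIffNew (a b : Char) (t : List Char) (r n : Int) (hba : b ≠ a) (hat : a ∉ t) :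
    (r = n ∨ 1 + (t.count b : Int) = n ∨ ∃ ch ∈ t, ch ≠ b ∧ (t.count ch : Int) = n) ↔
      (r + (((b :: t).count a : Int)) = n ∨ ∃ ch ∈ b :: t, ch ≠ a ∧ ((b :: t).count ch : Int) = n) := by
  have hca : (b :: t).count a = 0 := by
    rw [List.count_eq_zero]
    simp only [List.mem_cons, not_or]
    exact ⟨fun h => hba (h.symm), hat⟩
  rw [hca]
  constructor
  · rintro (h | h | ⟨ch, hch, hne, hc⟩)
    · left; push_cast; omega
    · refine Or.inr ⟨b, List.mem_cons_self .., hba, ?_⟩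
      rw [List.count_cons_self]; push_cast at h ⊢; omega
    · refine Or.inr ⟨ch, List.mem_cons_of_mem _ hch, fun he => hat (he ▸ hch), ?_⟩
      simp [Ne.symm hne]; exact_mod_cast hc
  · rintro (h | ⟨ch, hch, hne, hc⟩)
    · left; push_cast at h; omega
    · rcases List.mem_cons.mp hch with rfl | hch'
      · right; left; rw [List.count_cons_self] at hc; push_cast at hc ⊢; omega
      · by_cases hcb : ch = b
        · subst hcb; right; left; rw [List.count_cons_self] at hc; push_cast at hc ⊢; omega
        · refine Or.inr (Or.inr ⟨ch, hch', hcb, ?_⟩)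
          simp [Ne.symm hcb] at hc; exact_mod_cast hc

theorem pvA_contains (cs : List Char) (n : Int) :
    PySem.Set.contains (PySem.Set.ofList ((PySem.Dict.counter cs).values)) n
      = decide (∃ ch ∈ cs, (cs.count ch : Int) = n) := by
  have hv : (PySem.Dict.counter cs).values
      = (PySem.Set.ofList cs).map (fun k => (cs.count k : Int)) := by
    show ((PySem.Dict.counter cs).items).map (·.2) = _
    rw [PySem.Dict.items_counter]
    simp
  rw [Bool.eq_iff_iff, PySem.Set.contains_iff, PySem.Set.mem_ofList, hv, decide_eq_true_iff]
  simp only [List.mem_map]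
  constructor
  · rintro ⟨k, hk, rfl⟩
    exact ⟨k, (PySem.Set.mem_ofList _ _).mp hk, rfl⟩
  · rintro ⟨ch, hch, h⟩
    exact ⟨ch, (PySem.Set.mem_ofList _ _).mpr hch, h⟩

theorem pvRunH (t : List Char) (a : Char) (r : Int) (h2 h3 : Bool)
    (hs : t.Pairwise (· ≤ ·)) (hge : ∀ x ∈ t, a ≤ x) :
    pvFlush (t.foldl pvStep (h2, h3, some a, r)) =
      (h2 || decide (r + (t.count a : Int) = 2 ∨ ∃ ch ∈ t, ch ≠ a ∧ (t.count ch : Int) = 2),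
       h3 || decide (r + (t.count a : Int) = 3 ∨ ∃ ch ∈ t, ch ≠ a ∧ (t.count ch : Int) = 3)) := by
  induction t generalizing a r h2 h3 with
  | nil =>
      simp only [List.foldl_nil, pvFlush, List.count_nil, Nat.cast_zero, add_zero,
        List.not_mem_nil, false_and, exists_false, or_false, pvIntBeq]
  | cons b t ih =>
      have hab : a ≤ b := hge b (List.mem_cons_self ..)
      have hsb : ∀ x ∈ t, b ≤ x := fun x hx => (List.pairwise_cons.mp hs).1 x hx
      have hst : t.Pairwise (· ≤ ·) := (List.pairwise_cons.mp hs).2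
      rw [List.foldl_cons]
      by_cases hba : b = a
      · subst hba
        have hstep : pvStep (h2, h3, some b, r) b = (h2, h3, some b, r + 1) := by
          simp [pvStep]
        rw [hstep, ih b (r + 1) h2 h3 hst hsb]
        exact pvPairCongr h2 h3 (pvIffSame b t r 2) (pvIffSame b t r 3)
      · have hat : a ∉ t := fun h => hba (le_antisymm (hsb a h) hab)
        have hstep : pvStep (h2, h3, some a, r) b
            = (h2 || (r == 2), h3 || (r == 3), some b, 1) := by
          simp only [pvStep]
          rw [if_neg]
          simp only [Option.some.injEq]
          exact fun h => hba h.symm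
        rw [hstep, ih b 1 _ _ hst hsb]
        simp only [pvIntBeq, Bool.or_assoc, ← Bool.decide_or]
        exact pvPairCongr h2 h3 (pvIffNew a b t r 2 hba hat) (pvIffNew a b t r 3 hba hat)

theorem pvIffTop (a : Char) (t : List Char) (n : Int) :
    (1 + (t.count a : Int) = n ∨ ∃ ch ∈ t, ch ≠ a ∧ (t.count ch : Int) = n) ↔
      (∃ ch ∈ a :: t, (((a :: t).count ch : Int)) = n) := by
  constructor
  · rintro (h | ⟨ch, hch, hne, hc⟩)
    · exact ⟨a, List.mem_cons_self .., by rw [List.count_cons_self]; push_cast at h ⊢; omega⟩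
    · exact ⟨ch, List.mem_cons_of_mem _ hch, by simp [Ne.symm hne]; exact_mod_cast hc⟩
  · rintro ⟨ch, hch, hc⟩
    by_cases hca : ch = a
    · subst hca; rw [List.count_cons_self] at hc; left; push_cast at hc ⊢; omega
    · rcases List.mem_cons.mp hch with rfl | hch'
      · exact absurd rfl hca
      · refine Or.inr ⟨ch, hch', hca, ?_⟩
        simp [Ne.symm hca] at hc; exact_mod_cast hc

theorem pvB_string (cs : List Char) :
    pvFlush ((PySem.List.sorted cs (fun x => x) false).foldl pvStep (false, false, none, 0)) =
      (decide (∃ ch ∈ cs, (cs.count ch : Int) = 2), decide (∃ ch ∈ cs, (cs.count ch : Int) = 3)) := by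
  rcases hL : PySem.List.sorted cs (fun x => x) false with _ | ⟨a, t⟩
  · have hcs : cs = [] := (PySem.List.sorted_eq_nil_iff cs (fun x => x) false).mp hL
    subst hcs
    simp [pvFlush]
  · have hperm : (a :: t).Perm cs := hL ▸ PySem.List.sorted_perm cs (fun x => x) false
    have hpw : (a :: t).Pairwise (· ≤ ·) := by
      have h := PySem.List.sorted_pairwise cs (fun x => x)
      rw [hL] at h
      exact h
    have hstep : pvStep (false, false, none, 0) a = (false, false, some a, 1) := by
      simp [pvStep]
    rw [List.foldl_cons, hstep,
      pvRunH t a 1 false false (List.pairwise_cons.mp hpw).2 (List.pairwise_cons.mp hpw).1]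
    simp only [Bool.false_or]
    have hmc : ∀ n : Int, (1 + (t.count a : Int) = n ∨ ∃ ch ∈ t, ch ≠ a ∧ (t.count ch : Int) = n)
        ↔ (∃ ch ∈ cs, (cs.count ch : Int) = n) := by
      intro n
      rw [pvIffTop a t n]
      constructor
      · rintro ⟨ch, hch, hc⟩
        exact ⟨ch, hperm.mem_iff.mp hch, by rw [← hperm.count_eq]; exact hc⟩
      · rintro ⟨ch, hch, hc⟩
        exact ⟨ch, hperm.mem_iff.mpr hch, by rw [hperm.count_eq]; exact hc⟩
    rw [decide_eq_decide.mpr (hmc 2), decide_eq_decide.mpr (hmc 3)]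

-- the two per-string step functions of the outer folds are equal
theorem pvStepFunEq :
    (fun (acc : Int × Int) (c : String) =>
      let counter : PySem.Set Int := PySem.Set.ofList ((PySem.Dict.counter c.toList).values)
      let twos := if PySem.Set.contains counter 2 then acc.1 + 1 else acc.1
      let threes := if PySem.Set.contains counter 3 then acc.2 + 1 else acc.2
      ((twos, threes) : Int × Int)) =
    (fun (acc : Int × Int) (c : String) =>
      let p := pvFlush ((PySem.List.sorted c.toList (fun x => x) false).foldl pvStep (false, false, none, 0))
      (((if p.1 then acc.1 + 1 else acc.1), (if p.2 then acc.2 + 1 else acc.2)) : Int × Int)) := by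
  funext acc c
  simp only [pvA_contains, pvB_string]

-- ===== VERDICT (by name: the statement is the Claim_ definition above) =====
theorem prob1_spec : Claim_equal_prob1 := by
  intro s _
  show prob1 s = prob1_alt s
  simp only [prob1, prob1_alt]
  rw [pvStepFunEq]
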